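-- pv_equiv track=rewrite | github.com/re-innovation/bwp | Projection_Unit_Software/util/create_hamming_codes.py | parityAddress
-- ===== SOURCE A (Python) =====
-- def parityAddress(n, bits=12):
--     '''Get which bits go to make partity for specified bit
--
--     Arguments:
--     n -- the address of the bit of output
--     bits -- the length of the output
--
--     Returns:
--     a list of bit addresses in the output which are used to
--     generate the partity bit at address n. If n is a data bit
--     (i.e. not used to store parity), return None
--     '''
--
--     if n+1 in [2**x for x in range(0,5)]:
--         a = []
--         check = True
--         left = n+1
--         for i in range(n, bits):
--             if left == 0:
--                 left = n+1
--                 check = not check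
--             if check:
--                 a.append(i)
--             left -= 1
--         return a[1:]
--     else:
--         return None
-- ===== SOURCE B (Python) =====
-- def parityAddress(n, bits=12):
--     """Bit addresses feeding parity bit n; None if n is not a parity position."""
--     p = n + 1
--     if p not in (1, 2, 4, 8, 16):
--         return None
--     return [i for i in range(n + 1, bits) if (i + 1) & p]
-- ===== Notes on version B (the rewrite author's own statement) =====
-- stated objective: idiomatic
-- what changed: Replaces A's stateful loop (a countdown counter and a parity toggle maintained across iterations, then dropping the first collected element) by the closed-form Hamming coverage rule: keep i in range(n+1, bits) iff bit n+1 is set in i+1.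
import Mathlib
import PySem

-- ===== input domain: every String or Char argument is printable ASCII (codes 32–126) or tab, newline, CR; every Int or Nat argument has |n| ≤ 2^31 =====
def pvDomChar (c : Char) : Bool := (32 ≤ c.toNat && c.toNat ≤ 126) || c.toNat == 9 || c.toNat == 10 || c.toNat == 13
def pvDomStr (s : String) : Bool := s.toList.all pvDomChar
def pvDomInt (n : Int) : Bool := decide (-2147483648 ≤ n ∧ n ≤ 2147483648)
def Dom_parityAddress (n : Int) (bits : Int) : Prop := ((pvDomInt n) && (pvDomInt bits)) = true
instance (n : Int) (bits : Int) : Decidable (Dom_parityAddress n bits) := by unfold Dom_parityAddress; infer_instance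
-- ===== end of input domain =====

-- B replaces A's stateful countdown/toggle loop by the closed-form Hamming bit test
-- (i+1) & (n+1) over range(n+1, bits); same values everywhere (objective: idiomatic/simpler).

-- ===== PORT A =====
-- A's loop body: reset left/toggle check when left hits 0, append i when check holds, decrement left
def pvStepA (p : Int) (st : List Int × Bool × Int) (i : Int) : List Int × Bool × Int :=
  let check := if st.2.2 == 0 then !st.2.1 else st.2.1
  let left := if st.2.2 == 0 then p else st.2.2
  let a := if check then st.1 ++ [i] else st.1
  (a, check, left - 1)

def parityAddress (n : Int) (bits : Int) : Option (List Int) :=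
  if (n + 1) ∈ (PySem.List.pyRange 0 5 1).map (fun x => (2 : Int) ^ x.toNat) then
    let r := (PySem.List.pyRange n bits 1).foldl (pvStepA (n + 1)) ([], true, n + 1)
    some (PySem.List.slice r.1 (some 1) none)
  else
    none

-- ===== PORT B =====
def parityAddress_alt (n : Int) (bits : Int) : Option (List Int) :=
  let p := n + 1
  if p = 1 ∨ p = 2 ∨ p = 4 ∨ p = 8 ∨ p = 16 then
    some ((PySem.List.pyRange (n + 1) bits 1).filter (fun i => PySem.Int.band (i + 1) p != 0))
  else
    none

-- ===== PRECONDITION & SPEC =====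
def Spec_parityAddress (n : Int) (bits : Int) (out : Option (List Int)) : Prop := out = parityAddress_alt n bits
instance (n : Int) (bits : Int) (out : Option (List Int)) : Decidable (Spec_parityAddress n bits out) := by unfold Spec_parityAddress; infer_instance

-- ===== CLAIM (what is proved, stated in full; the proofs are below) =====
def Claim_equal_parityAddress : Prop := ∀ (n : Int) (bits : Int), Dom_parityAddress n bits → Spec_parityAddress n bits (parityAddress n bits)

-- ===== LEMMAS AND PROOFS =====

-- closed forms for A's loop state after j iterations, with block size P = n+1
def leftC (P : Nat) (j : Nat) : Int := if j = 0 then (P : Int) else (P : Int) - 1 - ((j - 1) % P : Nat)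
def checkC (P : Nat) (j : Nat) : Bool := if j = 0 then true else decide (((j - 1) / P) % 2 = 0)
def chk (P : Nat) (j : Nat) : Bool := decide ((j / P) % 2 = 0)

lemma succ_mod_div (P k : Nat) (hP : 0 < P) :
    ((k + 1) % P = if k % P = P - 1 then 0 else k % P + 1) ∧
    ((k + 1) / P = if k % P = P - 1 then k / P + 1 else k / P) := by
  by_cases h : k % P = P - 1
  · have h1 := Nat.div_add_mod k P
    have hc : P * (k / P) = (k / P) * P := Nat.mul_comm _ _
    have e : k + 1 = (k / P + 1) * P := by rw [Nat.add_mul, one_mul]; omega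
    constructor
    · rw [if_pos h, e]; exact Nat.mul_mod_left _ _
    · rw [if_pos h, e]; exact Nat.mul_div_cancel _ hP
  · have h1 := Nat.div_add_mod k P
    have h2 := Nat.mod_lt k hP
    have hc : P * (k / P) = (k / P) * P := Nat.mul_comm _ _
    have e : k + 1 = (k % P + 1) + P * (k / P) := by omega
    have hlt : k % P + 1 < P := by omega
    constructor
    · rw [if_neg h, e, Nat.add_mul_mod_self_left, Nat.mod_eq_of_lt hlt]
    · rw [if_neg h, e, Nat.add_mul_div_left _ _ hP, Nat.div_eq_of_lt hlt, Nat.zero_add]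

lemma stepA_closed (P : Nat) (hP : 0 < P) (j : Nat) (a : List Int) (i : Int) :
    pvStepA (P : Int) (a, checkC P j, leftC P j) i
      = ((if chk P j then a ++ [i] else a), checkC P (j + 1), leftC P (j + 1)) := by
  unfold pvStepA checkC leftC chk
  cases j with
  | zero =>
    have hne : (((P : Nat) : Int) == 0) = false := by
      simp only [beq_eq_false_iff_ne, ne_eq, Int.natCast_eq_zero]; omega
    simp [hne, Nat.zero_div, Nat.zero_mod]
  | succ k =>
    have hm := Nat.mod_lt k hP
    have hmd := succ_mod_div P k hP
    simp only [Nat.succ_ne_zero, if_false, Nat.add_sub_cancel, hmd.1, hmd.2]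
    by_cases h : k % P = P - 1
    · simp only [h, if_true]
      have hz : (((P : Nat) : Int) - 1 - ((P - 1 : Nat) : Int) == 0) = true := by
        simp only [beq_iff_eq, Nat.cast_sub (by omega : 1 ≤ P)]; push_cast; ring
      have hb : (!decide ((k / P) % 2 = 0)) = decide ((k / P + 1) % 2 = 0) := by
        by_cases he : (k / P) % 2 = 0 <;> simp [he] <;> omega
      simp [hz, hb]
    · simp only [if_neg h]
      have hz : (((P : Nat) : Int) - 1 - ((k % P : Nat) : Int) == 0) = false := by
        simp only [beq_eq_false_iff_ne, ne_eq]
        have : ((k % P : Nat) : Int) < ((P : Nat) : Int) := by exact_mod_cast hm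
        omega
      simp only [hz, Bool.false_eq_true, if_false, Prod.ext_iff]
      refine ⟨trivial, trivial, ?_⟩
      push_cast; ring

lemma foldA_closed (P : Nat) (hP : 0 < P) :
    ∀ (K : Nat) (j : Nat) (a : List Int) (g : Nat → Int),
    ((List.range K).map g).foldl (pvStepA (P : Int)) (a, checkC P j, leftC P j)
      = (a ++ (List.range K).filterMap (fun k => if chk P (j + k) then some (g k) else none),
         checkC P (j + K), leftC P (j + K)) := by
  intro K
  induction K with
  | zero => intro j a g; simp
  | succ K ih =>
    intro j a g
    rw [List.range_succ_eq_map]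
    simp only [List.map_cons, List.foldl_cons, List.map_map]
    rw [stepA_closed P hP]
    rw [ih (j + 1) (if chk P j then a ++ [g 0] else a) (g ∘ Nat.succ)]
    have h1 : j + 1 + K = j + (K + 1) := by omega
    have h2 : (fun k => if chk P (j + 1 + k) then some ((g ∘ Nat.succ) k) else none)
        = (fun k => (fun m => if chk P (j + m) then some (g m) else none) (Nat.succ k)) := by
      funext k
      have : j + 1 + k = j + Nat.succ k := by omega
      rw [this]; rfl
    rw [h1, h2]
    simp only [List.filterMap_cons, List.filterMap_map, Nat.add_zero]
    by_cases hc : chk P j = true <;> simp [hc, Function.comp]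

lemma band_pow (t m : Nat) : ((2 ^ t + m) &&& 2 ^ t ≠ 0) ↔ (m / 2 ^ t) % 2 = 0 := by
  rw [Nat.and_two_pow, Nat.testBit_eq_decide_div_mod_eq]
  have h2 : 0 < 2 ^ t := by positivity
  rw [Nat.add_comm, Nat.add_div_right _ h2]
  rcases Nat.mod_two_eq_zero_or_one (m / 2 ^ t) with h | h <;>
    simp [Nat.add_mod, h]

lemma filterMap_ite {α : Type} (l : List Nat) (c : Nat → Bool) (f : Nat → α) :
    l.filterMap (fun k => if c k then some (f k) else none) = (l.filter c).map f := by
  induction l with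
  | nil => rfl
  | cons x xs ih => by_cases h : c x <;> simp [h, ih]

lemma cond_eq (t k : Nat) :
    (PySem.Int.band ((((2 ^ t : Nat) : Int) + (k : Int)) + 1) ((2 ^ t : Nat) : Int) != 0)
      = chk (2 ^ t) (k + 1) := by
  have hcast : (((2 ^ t : Nat) : Int) + (k : Int)) + 1 = ((2 ^ t + (k + 1) : Nat) : Int) := by
    push_cast; ring
  rw [hcast, PySem.Int.band_natCast]
  unfold chk
  have hb := band_pow t (k + 1)
  by_cases h : ((k + 1) / 2 ^ t) % 2 = 0
  · have := hb.mpr h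
    simp [h, bne_iff_ne, Int.natCast_eq_zero, this]
  · have : ((2 ^ t + (k + 1)) &&& 2 ^ t) = 0 := by
      by_contra hc; exact h (hb.mp hc)
    simp [h, this]

lemma core (t : Nat) (n bits : Int) (hn : n + 1 = ((2 ^ t : Nat) : Int)) :
    PySem.List.slice ((PySem.List.pyRange n bits 1).foldl (pvStepA (n + 1)) ([], true, n + 1)).1 (some 1) none
      = (PySem.List.pyRange (n + 1) bits 1).filter (fun i => PySem.Int.band (i + 1) (n + 1) != 0) := by
  have hP : 0 < 2 ^ t := by positivity
  obtain rfl : n = ((2 ^ t : Nat) : Int) - 1 := by omega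
  have heq : (((2 ^ t : Nat) : Int) - 1) + 1 = ((2 ^ t : Nat) : Int) := by ring
  rw [heq, PySem.List.pyRange_one, PySem.List.pyRange_one]
  have hstart : (([] : List Int), true, ((2 ^ t : Nat) : Int))
      = (([] : List Int), checkC (2 ^ t) 0, leftC (2 ^ t) 0) := by
    simp [checkC, leftC]
  rw [hstart, foldA_closed (2 ^ t) hP ((bits - (((2 ^ t : Nat) : Int) - 1)).toNat) 0 []
      (fun k => (((2 ^ t : Nat) : Int) - 1) + (k : Int))]
  cases hK : (bits - (((2 ^ t : Nat) : Int) - 1)).toNat with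
  | zero =>
    have hK' : (bits - ((2 ^ t : Nat) : Int)).toNat = 0 := by omega
    rw [hK']
    simp [PySem.List.slice_from_one]
  | succ K0 =>
    have hK' : (bits - ((2 ^ t : Nat) : Int)).toNat = K0 := by omega
    rw [hK', List.range_succ_eq_map]
    simp only [List.filterMap_cons, List.filterMap_map, List.nil_append,
      Nat.zero_add, Nat.cast_zero, add_zero]
    have hchk0 : chk (2 ^ t) 0 = true := by simp [chk]
    rw [hchk0]
    simp only [if_true, PySem.List.slice_from_one, List.tail_cons]
    rw [List.filter_map]
    simp only [Function.comp_def]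
    rw [filterMap_ite (List.range K0) (fun k => chk (2 ^ t) (k + 1))
        (fun k => ((2 ^ t : Nat) : Int) - 1 + ((k + 1 : Nat) : Int))]
    have hfeq : List.filter (fun k => chk (2 ^ t) (k + 1)) (List.range K0)
        = List.filter (fun (k : Nat) => PySem.Int.band ((((2 ^ t : Nat) : Int) + (k : Int)) + 1) ((2 ^ t : Nat) : Int) != 0) (List.range K0) := by
      apply List.filter_congr
      intro k _
      rw [cond_eq]
    rw [hfeq]
    apply List.map_congr_left
    intro k _
    push_cast
    ring

-- ===== VERDICT (by name: the statement is the Claim_ definition above) =====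
theorem parityAddress_spec : Claim_equal_parityAddress := by
  unfold Claim_equal_parityAddress
  intro n bits _
  unfold Spec_parityAddress parityAddress parityAddress_alt
  have hlist : (PySem.List.pyRange 0 5 1).map (fun x => (2 : Int) ^ x.toNat) = [1, 2, 4, 8, 16] := by
    decide
  rw [hlist]
  by_cases hmem : n + 1 = 1 ∨ n + 1 = 2 ∨ n + 1 = 4 ∨ n + 1 = 8 ∨ n + 1 = 16
  · have hmem' : n + 1 ∈ ([1, 2, 4, 8, 16] : List Int) := by
      rcases hmem with h | h | h | h | h <;> simp [h]
    rw [if_pos hmem', if_pos hmem]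
    rcases hmem with h | h | h | h | h
    · exact congrArg some (core 0 n bits (by push_cast; omega))
    · exact congrArg some (core 1 n bits (by push_cast; omega))
    · exact congrArg some (core 2 n bits (by push_cast; omega))
    · exact congrArg some (core 3 n bits (by push_cast; omega))
    · exact congrArg some (core 4 n bits (by push_cast; omega))
  · have hmem' : n + 1 ∉ ([1, 2, 4, 8, 16] : List Int) := by
      simp only [List.mem_cons, List.not_mem_nil, or_false]
      tauto
    rw [if_neg hmem', if_neg hmem]
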